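-- pv_equiv track=rewrite | github.com/cjh12345678910/AgentOpsHub | agent_runtime/state_machine.py | _extract_http_url
-- ===== SOURCE A (Python) =====
-- from typing import Any, Dict, List, Optional, Tuple
--
-- def _extract_http_url(prompt: str) -> Optional[str]:
--     lowered = (prompt or "").lower()
--     if "[use-http]" not in lowered:
--         return None
--     for token in (prompt or "").split():
--         if token.startswith("http://") or token.startswith("https://"):
--             return token.strip()
--     return None
-- ===== SOURCE B (Python) =====
-- from typing import Optional
--
--
-- def _extract_http_url(prompt: str) -> Optional[str]:
--     s = prompt or ""
--     if "[use-http]" not in s.lower():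
--         return None
--     n = len(s)
--     for i in range(n):
--         if (i == 0 or s[i - 1].isspace()) and (
--             s.startswith("http://", i) or s.startswith("https://", i)
--         ):
--             j = i
--             while j < n and not s[j].isspace():
--                 j += 1
--             return s[i:j]
--     return None
-- ===== Notes on version B (the rewrite author's own statement) =====
-- stated objective: alternative
-- what changed: Instead of materialising the whitespace-split token list and looping over tokens, B makes one character-level scan: it looks for a token-boundary position (start of string or after whitespace) where a http/https scheme prefix begins, and slices the token out up to the next whitespace, so no token list is ever built.
import Mathlib
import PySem

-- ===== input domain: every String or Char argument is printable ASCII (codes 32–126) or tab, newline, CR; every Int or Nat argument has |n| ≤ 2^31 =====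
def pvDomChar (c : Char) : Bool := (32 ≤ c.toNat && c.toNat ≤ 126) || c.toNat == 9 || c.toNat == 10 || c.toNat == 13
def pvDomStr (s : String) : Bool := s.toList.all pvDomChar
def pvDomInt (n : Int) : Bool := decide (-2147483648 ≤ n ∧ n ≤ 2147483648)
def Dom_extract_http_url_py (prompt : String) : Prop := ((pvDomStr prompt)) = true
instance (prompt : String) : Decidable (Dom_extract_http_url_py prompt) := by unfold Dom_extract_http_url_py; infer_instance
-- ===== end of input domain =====

-- B replaces A's split()-then-loop-over-tokens with a single character-level scan for a
-- token-boundary occurrence of a http/https scheme prefix (objective: alternative, same cost).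

-- ===== PORT A =====
-- the 'for token in (prompt or "").split():' loop of A
def pvATokLoop : List (List Char) → Option (List Char)
  | [] => none
  | t :: rest =>
    if PySem.Chars.startswith t ("http://".toList) || PySem.Chars.startswith t ("https://".toList) then
      some (PySem.Chars.strip t)
    else pvATokLoop rest

def extract_http_url_py (prompt : String) : Option String :=
  let lowered := PySem.Str.lower prompt
  if PySem.Str.isIn "[use-http]" lowered = false then none
  else (pvATokLoop (PySem.Chars.split₀ prompt.toList)).map String.ofList

-- ===== PORT B =====
-- B's 'for i in range(n)' scan; the Bool is 'i == 0 or s[i-1].isspace()' (token boundary);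
-- the inner 'while j < n and not s[j].isspace(); return s[i:j]' is the takeWhile of the suffix.
def pvBScan : Bool → List Char → Option (List Char)
  | _, [] => none
  | atStart, c :: rest =>
    if atStart && (PySem.Chars.startswith (c :: rest) ("http://".toList)
                   || PySem.Chars.startswith (c :: rest) ("https://".toList)) then
      some ((c :: rest).takeWhile (fun d => !PySem.Chars.isspace d))
    else pvBScan (PySem.Chars.isspace c) rest

def extract_http_url_py_alt (prompt : String) : Option String :=
  if PySem.Str.isIn "[use-http]" (PySem.Str.lower prompt) = false then none
  else (pvBScan true prompt.toList).map String.ofList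

-- ===== PRECONDITION & SPEC =====
def Spec_extract_http_url_py (prompt : String) (out : Option String) : Prop := out = extract_http_url_py_alt prompt
instance (prompt : String) (out : Option String) : Decidable (Spec_extract_http_url_py prompt out) := by unfold Spec_extract_http_url_py; infer_instance

-- ===== CLAIM (what is proved, stated in full; the proofs are below) =====
def Claim_equal_extract_http_url_py : Prop := ∀ (prompt : String), Dom_extract_http_url_py prompt → Spec_extract_http_url_py prompt (extract_http_url_py prompt)

-- ===== LEMMAS AND PROOFS =====

theorem pv_split_nil : PySem.Chars.split₀ [] = [] := by
  unfold PySem.Chars.split₀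
  rw [PySem.Chars.split₀.go.eq_def]
  simp

theorem pv_split_cons_space (c : Char) (rest : List Char) (hs : PySem.Chars.isspace c = true) :
    PySem.Chars.split₀ (c :: rest) = PySem.Chars.split₀ rest := by
  unfold PySem.Chars.split₀
  rw [PySem.Chars.split₀.go.eq_def]
  simp [hs]

-- split₀.go prepends its accumulator of finished words
theorem pv_split_go_acc : ∀ (s cur : List Char) (acc : List (List Char)),
    PySem.Chars.split₀.go s cur acc = acc.reverse ++ PySem.Chars.split₀.go s cur [] := by
  intro s
  induction s with
  | nil =>
      intro cur acc
      rw [PySem.Chars.split₀.go.eq_def, PySem.Chars.split₀.go.eq_def]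
      cases hc : cur.isEmpty <;> simp [hc]
  | cons c rest ih =>
      intro cur acc
      rw [PySem.Chars.split₀.go.eq_def]
      conv_rhs => rw [PySem.Chars.split₀.go.eq_def]
      dsimp only
      cases hs : PySem.Chars.isspace c
      · simp only [Bool.false_eq_true, if_false]
        exact ih (c :: cur) acc
      · rw [if_pos rfl]
        conv_rhs => rw [if_pos rfl]
        cases hc : cur.isEmpty
        · rw [if_neg (by simp), if_neg (by simp)]
          rw [ih [] (cur.reverse :: acc), ih [] [cur.reverse]]
          simp
        · rw [ih [] acc]
          simp

-- a word in progress: go closes it with the rest of the current token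
theorem pv_split_go_token : ∀ (s cur : List Char), cur ≠ [] →
    PySem.Chars.split₀.go s cur [] =
      (cur.reverse ++ s.takeWhile (fun d => !PySem.Chars.isspace d)) ::
        PySem.Chars.split₀ (s.dropWhile (fun d => !PySem.Chars.isspace d)) := by
  intro s
  induction s with
  | nil =>
      intro cur hcur
      rw [PySem.Chars.split₀.go.eq_def]
      simp [List.isEmpty_iff, hcur, pv_split_nil]
  | cons c rest ih =>
      intro cur hcur
      rw [PySem.Chars.split₀.go.eq_def]
      dsimp only
      cases hs : PySem.Chars.isspace c
      · simp only [Bool.false_eq_true, if_false]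
        rw [ih (c :: cur) (by simp)]
        simp [hs]
      · rw [if_pos rfl]
        rw [if_neg (by simpa [List.isEmpty_iff] using hcur)]
        rw [pv_split_go_acc rest [] [cur.reverse]]
        have hgo : PySem.Chars.split₀.go rest [] [] = PySem.Chars.split₀ rest := rfl
        rw [hgo]
        simp [hs, pv_split_cons_space c rest hs]

theorem pv_split_cons_nonspace (c : Char) (rest : List Char)
    (hs : PySem.Chars.isspace c = false) :
    PySem.Chars.split₀ (c :: rest) =
      ((c :: rest).takeWhile (fun d => !PySem.Chars.isspace d)) ::
        PySem.Chars.split₀ ((c :: rest).dropWhile (fun d => !PySem.Chars.isspace d)) := by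
  unfold PySem.Chars.split₀
  rw [PySem.Chars.split₀.go.eq_def]
  simp only [hs, Bool.false_eq_true, if_false]
  rw [pv_split_go_token rest [c] (by simp)]
  simp [hs, PySem.Chars.split₀]

-- a whitespace-free pattern is a prefix of s iff it is a prefix of s's leading token
theorem pv_prefix_takeWhile : ∀ (p s : List Char), (∀ a ∈ p, PySem.Chars.isspace a = false) →
    (p <+: s.takeWhile (fun d => !PySem.Chars.isspace d) ↔ p <+: s) := by
  intro p
  induction p with
  | nil => intro s _; simp
  | cons a p' ih =>
      intro s hp
      cases s with
      | nil => simp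
      | cons b s' =>
        by_cases hb : PySem.Chars.isspace b = true
        · simp only [List.takeWhile_cons, hb, Bool.not_true]
          constructor
          · intro h; exact absurd h (by simp)
          · intro h
            rcases (List.cons_prefix_cons.mp h) with ⟨hab, _⟩
            have := hp a (by simp)
            rw [hab] at this; rw [this] at hb; exact absurd hb (by simp)
        · replace hb : PySem.Chars.isspace b = false := by
            cases h' : PySem.Chars.isspace b
            · rfl
            · exact absurd h' hb
          simp only [List.takeWhile_cons, hb, Bool.not_false, if_true,
            List.cons_prefix_cons]
          constructor
          · rintro ⟨hab, h⟩
            exact ⟨hab, (ih s' (fun x hx => hp x (by simp [hx]))).mp h⟩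
          · rintro ⟨hab, h⟩
            exact ⟨hab, (ih s' (fun x hx => hp x (by simp [hx]))).mpr h⟩

theorem pv_strip_nospace (l : List Char) (h : ∀ a ∈ l, PySem.Chars.isspace a = false) :
    PySem.Chars.strip l = l := by
  unfold PySem.Chars.strip PySem.Chars.lstrip PySem.Chars.rstrip
  have h1 : List.dropWhile PySem.Chars.isspace l = l :=
    List.dropWhile_eq_self_iff.mpr (fun hl => by simp [h _ (List.getElem_mem hl)])
  rw [h1]
  have h2 : List.dropWhile PySem.Chars.isspace l.reverse = l.reverse :=
    List.dropWhile_eq_self_iff.mpr (fun hl => by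
      have hmem : l.reverse[0] ∈ l := by
        have := List.getElem_mem hl
        rwa [List.mem_reverse] at this
      rw [h _ hmem]; simp)
  rw [h2, List.reverse_reverse]

theorem pv_pat_nospace7 : ∀ a ∈ ("http://".toList), PySem.Chars.isspace a = false := by
  rw [show "http://".toList = ['h','t','t','p',':','/','/'] by simp]
  intro a ha
  fin_cases ha <;> rfl

theorem pv_pat_nospace8 : ∀ a ∈ ("https://".toList), PySem.Chars.isspace a = false := by
  rw [show "https://".toList = ['h','t','t','p','s',':','/','/'] by simp]
  intro a ha
  fin_cases ha <;> rfl

theorem pv_startswith_space (c : Char) (rest p : List Char) (hs : PySem.Chars.isspace c = true)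
    (hp : ∀ a ∈ p, PySem.Chars.isspace a = false) (hne : p ≠ []) :
    PySem.Chars.startswith (c :: rest) p = false := by
  cases p with
  | nil => exact absurd rfl hne
  | cons a p' =>
    rw [Bool.eq_false_iff]
    intro hsw
    have hpre : (a :: p') <+: (c :: rest) := (PySem.Chars.startswith_iff _ _).mp hsw
    rcases List.cons_prefix_cons.mp hpre with ⟨hac, -⟩
    have hna := hp a (by simp)
    rw [hac, hs] at hna
    exact absurd hna (by simp)

-- the scan agrees with the token loop: flag true = at a token boundary,
-- flag false = inside an already rejected token (skip to its end)
theorem pv_scan_eq : ∀ (s : List Char) (b : Bool),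
    pvBScan b s = pvATokLoop (PySem.Chars.split₀
      (if b then s else s.dropWhile (fun d => !PySem.Chars.isspace d))) := by
  intro s
  induction s with
  | nil =>
      intro b
      cases b <;> simp [pvBScan, pv_split_nil, pvATokLoop]
  | cons c rest ih =>
      intro b
      cases hs : PySem.Chars.isspace c
      · -- c is not whitespace
        cases b
        · -- mid-token: skip
          have hscan : pvBScan false (c :: rest) = pvBScan false rest := by
            simp only [pvBScan, Bool.false_and]
            rw [if_neg (by simp), hs]
          rw [hscan, ih false]
          simp [hs]
        · -- token boundary at a non-space char
          have hpred : ∀ p : List Char, (∀ a ∈ p, PySem.Chars.isspace a = false) →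
              PySem.Chars.startswith ((c :: rest).takeWhile (fun d => !PySem.Chars.isspace d)) p
                = PySem.Chars.startswith (c :: rest) p := by
            intro p hp
            by_cases h : p <+: (c :: rest)
            · rw [(PySem.Chars.startswith_iff _ _).mpr h,
                  (PySem.Chars.startswith_iff _ _).mpr ((pv_prefix_takeWhile p (c :: rest) hp).mpr h)]
            · rw [Bool.eq_false_iff.mpr
                    (fun hb => h ((pv_prefix_takeWhile p (c :: rest) hp).mp
                      ((PySem.Chars.startswith_iff _ _).mp hb))),
                  Bool.eq_false_iff.mpr (fun hb => h ((PySem.Chars.startswith_iff _ _).mp hb))]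
          rw [if_pos rfl, pv_split_cons_nonspace c rest hs]
          by_cases hm : (PySem.Chars.startswith (c :: rest) ("http://".toList)
              || PySem.Chars.startswith (c :: rest) ("https://".toList)) = true
          · have hmt : (PySem.Chars.startswith
                  ((c :: rest).takeWhile (fun d => !PySem.Chars.isspace d)) ("http://".toList)
                || PySem.Chars.startswith
                  ((c :: rest).takeWhile (fun d => !PySem.Chars.isspace d)) ("https://".toList)) = true := by
              rw [hpred _ pv_pat_nospace7, hpred _ pv_pat_nospace8]; exact hm
            have hstrip : PySem.Chars.strip ((c :: rest).takeWhile (fun d => !PySem.Chars.isspace d))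
                = (c :: rest).takeWhile (fun d => !PySem.Chars.isspace d) :=
              pv_strip_nospace _ (fun a ha => by
                have := List.mem_takeWhile_imp ha
                simpa using this)
            have hL : pvBScan true (c :: rest)
                = some ((c :: rest).takeWhile (fun d => !PySem.Chars.isspace d)) := by
              simp only [pvBScan, Bool.true_and]
              rw [if_pos hm]
            rw [hL]
            simp only [pvATokLoop]
            rw [if_pos hmt, hstrip]
          · have hmt : ¬ (PySem.Chars.startswith
                  ((c :: rest).takeWhile (fun d => !PySem.Chars.isspace d)) ("http://".toList)
                || PySem.Chars.startswith
                  ((c :: rest).takeWhile (fun d => !PySem.Chars.isspace d)) ("https://".toList)) = true := by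
              rw [hpred _ pv_pat_nospace7, hpred _ pv_pat_nospace8]; exact hm
            have hL : pvBScan true (c :: rest) = pvBScan false rest := by
              simp only [pvBScan, Bool.true_and]
              rw [if_neg hm, hs]
            rw [hL, ih false]
            simp only [pvATokLoop]
            rw [if_neg hmt]
            simp [hs]
      · -- c is whitespace: neither port can match here
        have g7 : PySem.Chars.startswith (c :: rest) ("http://".toList) = false :=
          pv_startswith_space c rest _ hs pv_pat_nospace7 (by simp)
        have g8 : PySem.Chars.startswith (c :: rest) ("https://".toList) = false :=
          pv_startswith_space c rest _ hs pv_pat_nospace8 (by simp)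
        have hscan : pvBScan b (c :: rest) = pvBScan true rest := by
          simp only [pvBScan, g7, g8, Bool.or_self, Bool.and_false]
          rw [if_neg (by simp), hs]
        rw [hscan, ih true]
        cases b
        · simp [hs, pv_split_cons_space c rest hs]
        · simp [pv_split_cons_space c rest hs]

-- ===== VERDICT (by name: the statement is the Claim_ definition above) =====
theorem extract_http_url_py_spec : Claim_equal_extract_http_url_py := by
  intro prompt _
  unfold Spec_extract_http_url_py extract_http_url_py extract_http_url_py_alt
  by_cases h : PySem.Str.isIn "[use-http]" (PySem.Str.lower prompt) = false
  · rw [if_pos h, if_pos h]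
  · rw [if_neg h, if_neg h, pv_scan_eq prompt.toList true]
    simp
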